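-- pv_equiv track=rewrite | github.com/AustinTSchaffer/DailyProgrammer | AdventOfCode/2024/day_01/sln.py | part_2
-- ===== SOURCE A (Python) =====
-- Input = list[tuple[int, int]]
--
-- def part_2(input: Input):
--     counted = {}
--     for _, v in input:
--         count = counted.get(v, 0)
--         counted[v] = count + 1
--
--     return sum(
--         counted.get(v, 0) * v
--         for v, _ in input
--     )
-- ===== SOURCE B (Python) =====
-- def part_2(input):
--     left_count = {}
--     right_count = {}
--     for a, b in input:
--         left_count[a] = left_count.get(a, 0) + 1
--         right_count[b] = right_count.get(b, 0) + 1
--     return sum(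
--         v * c * right_count.get(v, 0)
--         for v, c in left_count.items()
--     )
-- ===== Notes on version B (the rewrite author's own statement) =====
-- stated objective: alternative
-- what changed: Builds frequency tables for BOTH columns in one pass and folds over the distinct left values only, accumulating v * left_count * right_count, instead of re-scanning every left entry of the input against a single right-count dict.
import Mathlib
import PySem

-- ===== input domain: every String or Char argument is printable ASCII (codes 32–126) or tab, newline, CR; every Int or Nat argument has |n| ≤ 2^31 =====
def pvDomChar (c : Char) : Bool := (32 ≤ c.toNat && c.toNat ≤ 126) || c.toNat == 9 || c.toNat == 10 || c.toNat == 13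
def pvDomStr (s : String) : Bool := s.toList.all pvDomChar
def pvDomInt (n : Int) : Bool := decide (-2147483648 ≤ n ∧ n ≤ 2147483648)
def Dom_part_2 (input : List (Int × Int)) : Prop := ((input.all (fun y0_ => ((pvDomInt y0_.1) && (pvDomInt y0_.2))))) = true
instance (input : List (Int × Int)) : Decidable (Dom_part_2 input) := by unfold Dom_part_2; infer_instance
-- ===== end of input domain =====

-- B builds frequency tables for both columns in one pass and folds over the distinct
-- left values only (v * left_count * right_count), instead of re-scanning every left
-- entry against a single right-count dict (objective: alternative decomposition).


-- ===== PORT A =====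
def part_2 (input : List (Int × Int)) : Int :=
  -- counted = {}; for _, v in input: counted[v] = counted.get(v, 0) + 1
  let counted : PySem.Dict Int Int :=
    input.foldl (fun d p => d.insert p.2 (d.getD p.2 0 + 1)) PySem.Dict.empty
  -- sum(counted.get(v, 0) * v for v, _ in input)
  input.foldl (fun s p => s + counted.getD p.1 0 * p.1) 0

-- ===== PORT B =====
def part_2_alt (input : List (Int × Int)) : Int :=
  -- one pass building both frequency tables
  let tabs : PySem.Dict Int Int × PySem.Dict Int Int :=
    input.foldl
      (fun t p =>
        (t.1.insert p.1 (t.1.getD p.1 0 + 1), t.2.insert p.2 (t.2.getD p.2 0 + 1)))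
      (PySem.Dict.empty, PySem.Dict.empty)
  -- sum(v * c * right_count.get(v, 0) for v, c in left_count.items())
  tabs.1.items.foldl (fun s kc => s + kc.1 * kc.2 * tabs.2.getD kc.1 0) 0

-- ===== PRECONDITION & SPEC =====
def Spec_part_2 (input : List (Int × Int)) (out : Int) : Prop := out = part_2_alt input
instance (input : List (Int × Int)) (out : Int) : Decidable (Spec_part_2 input out) := by unfold Spec_part_2; infer_instance

-- ===== CLAIM (what is proved, stated in full; the proofs are below) =====
def Claim_equal_part_2 : Prop := ∀ (input : List (Int × Int)), Dom_part_2 input → Spec_part_2 input (part_2 input)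

-- ===== LEMMAS AND PROOFS =====

-- the paired fold of B is the pair of the two single-dict folds
theorem pv_foldl_pair (l : List (Int × Int)) (d1 d2 : PySem.Dict Int Int) :
    l.foldl
      (fun (t : PySem.Dict Int Int × PySem.Dict Int Int) p =>
        (t.1.insert p.1 (t.1.getD p.1 0 + 1), t.2.insert p.2 (t.2.getD p.2 0 + 1)))
      (d1, d2)
    = (l.foldl (fun d p => d.insert p.1 (d.getD p.1 0 + 1)) d1,
       l.foldl (fun d p => d.insert p.2 (d.getD p.2 0 + 1)) d2) := by
  induction l generalizing d1 d2 with
  | nil => rfl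
  | cons p l ih => simp [List.foldl, ih]

-- a fold over pairs inserting a projected key is the counter of the projected column
theorem pv_fold_counter (l : List (Int × Int)) (f : Int × Int → Int) :
    l.foldl (fun (d : PySem.Dict Int Int) p => d.insert (f p) (d.getD (f p) 0 + 1))
      PySem.Dict.empty
    = PySem.Dict.counter (l.map f) := by
  rw [← PySem.Dict.foldl_insert_getD_add_one_eq_counter, List.foldl_map]

-- grouping: summing f over l equals summing count·f over the distinct values of l
theorem pv_group (l : List Int) (f : Int → Int) :
    (l.map f).sum
      = ((PySem.List.dedup l).map (fun k => (l.count k : Int) * f k)).sum := by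
  rw [Finset.sum_list_map_count]
  rw [← List.sum_toFinset _ (PySem.List.nodup_dedup l)]
  have hfin : (PySem.List.dedup l).toFinset = l.toFinset := by
    ext x; simp
  rw [hfin]
  refine Finset.sum_congr rfl (fun m _ => ?_)
  ring

-- ===== VERDICT (by name: the statement is the Claim_ definition above) =====
theorem part_2_spec : Claim_equal_part_2 := by
  intro input _
  unfold Spec_part_2 part_2 part_2_alt
  rw [pv_foldl_pair]
  rw [pv_fold_counter input Prod.fst, pv_fold_counter input Prod.snd]
  simp only [PySem.Dict.items_counter, PySem.List.foldl_add, List.map_map]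
  have hA :
      (input.map (fun p => (PySem.Dict.counter (input.map Prod.snd)).getD p.1 0 * p.1)).sum
        = ((input.map Prod.fst).map
            (fun x => ((input.map Prod.snd).count x : Int) * x)).sum := by
    rw [List.map_map]
    refine congrArg List.sum (List.map_congr_left (fun p _ => ?_))
    simp [PySem.Dict.getD_counter]
  rw [hA, pv_group]
  refine congrArg (0 + ·) (congrArg List.sum ?_)
  rw [← PySem.List.dedup_eq_ofList]
  refine List.map_congr_left (fun k _ => ?_)
  simp [PySem.Dict.getD_counter]
  ring
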